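-- pv_equiv track=rewrite | github.com/darbyxa/CS2006_A2 | invertedInteger.py | has_associative_inverted_multiplication
-- ===== SOURCE A (Python) =====
-- def has_associative_inverted_multiplication(n, alpha):
--       for x in range(n):
--             for y in range(n):
--                   for z in range(n):
--                         # calculates left part of the equation
--                         xy = (x + y - alpha * x * y) % n
--                         l = (xy + z - alpha * xy * z) % n
--
--                         # calculates right part of the equation
--                         yz = (y + z - alpha * y * z) % n
--                         r = (x + yz - alpha * x * yz) % n
--
--                         # checks if they equal
--                         if l != r:
--                               return False
--       return True
-- ===== SOURCE B (Python) =====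
-- def has_associative_inverted_multiplication(n, alpha):
--     # The operation x*y = x + y - alpha*x*y is associative over Z_n for every
--     # n and alpha: both sides expand to x+y+z - alpha(xy+xz+yz) + alpha^2*xyz mod n.
--     return True
-- ===== Notes on version B (the rewrite author's own statement) =====
-- stated objective: faster
-- what changed: Replaced the O(n^3) brute-force triple loop with the constant True: x*y = x+y-alpha*x*y is associative over Z_n for every n and alpha (both sides expand to the same symmetric polynomial mod n), proved in Lean.
import Mathlib
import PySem

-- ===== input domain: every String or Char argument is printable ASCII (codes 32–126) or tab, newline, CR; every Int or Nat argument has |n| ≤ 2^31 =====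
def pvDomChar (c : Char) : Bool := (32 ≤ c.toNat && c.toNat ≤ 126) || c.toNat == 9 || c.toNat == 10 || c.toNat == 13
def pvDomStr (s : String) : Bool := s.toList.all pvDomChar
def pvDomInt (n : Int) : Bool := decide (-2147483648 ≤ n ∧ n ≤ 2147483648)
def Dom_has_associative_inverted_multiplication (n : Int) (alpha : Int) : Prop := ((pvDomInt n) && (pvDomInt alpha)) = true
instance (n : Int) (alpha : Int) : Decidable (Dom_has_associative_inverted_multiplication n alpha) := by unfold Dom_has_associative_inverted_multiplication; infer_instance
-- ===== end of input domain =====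

-- B replaces A's O(n^3) brute-force check with the constant True (measured faster): the operation x*y = x+y-alpha*x*y is associative over Z_n for every n and alpha, proved below.


-- ===== PORT A =====
-- triple loop over range(n) with early `return False`; ported as nested `all` over pyRange
def has_associative_inverted_multiplication (n : Int) (alpha : Int) : Bool :=
  (PySem.List.pyRange 0 n 1).all (fun x =>
    (PySem.List.pyRange 0 n 1).all (fun y =>
      (PySem.List.pyRange 0 n 1).all (fun z =>
        let xy := PySem.Int.mod (x + y - alpha * x * y) n
        let l := PySem.Int.mod (xy + z - alpha * xy * z) n
        let yz := PySem.Int.mod (y + z - alpha * y * z) n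
        let r := PySem.Int.mod (x + yz - alpha * x * yz) n
        l == r)))

-- ===== PORT B =====
def has_associative_inverted_multiplication_alt (n : Int) (alpha : Int) : Bool := true

-- ===== PRECONDITION & SPEC =====
def Spec_has_associative_inverted_multiplication (n : Int) (alpha : Int) (out : Bool) : Prop := out = has_associative_inverted_multiplication_alt n alpha
instance (n : Int) (alpha : Int) (out : Bool) : Decidable (Spec_has_associative_inverted_multiplication n alpha out) := by unfold Spec_has_associative_inverted_multiplication; infer_instance

-- ===== CLAIM (what is proved, stated in full; the proofs are below) =====
def Claim_equal_has_associative_inverted_multiplication : Prop := ∀ (n : Int) (alpha : Int), Dom_has_associative_inverted_multiplication n alpha → Spec_has_associative_inverted_multiplication n alpha (has_associative_inverted_multiplication n alpha)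

-- ===== LEMMAS AND PROOFS =====

-- ===== VERDICT (by name: the statement is the Claim_ definition above) =====
-- Key fact: the two sides of the associativity equation agree mod n.
theorem hai_inner (n alpha x y z : Int) (hn : 0 < n) :
    PySem.Int.mod (PySem.Int.mod (x + y - alpha * x * y) n + z
        - alpha * PySem.Int.mod (x + y - alpha * x * y) n * z) n
      = PySem.Int.mod (x + PySem.Int.mod (y + z - alpha * y * z) n
        - alpha * x * PySem.Int.mod (y + z - alpha * y * z) n) n := by
  simp only [PySem.Int.mod_eq_emod_of_pos hn]
  set a := x + y - alpha * x * y with ha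
  set b := y + z - alpha * y * z with hb
  have hma : a % n ≡ a [ZMOD n] := Int.emod_emod_of_dvd a dvd_rfl
  have hmb : b % n ≡ b [ZMOD n] := Int.emod_emod_of_dvd b dvd_rfl
  have hL : a % n + z - alpha * (a % n) * z ≡ a + z - alpha * a * z [ZMOD n] :=
    (hma.add_right z).sub (((hma.mul_left alpha)).mul_right z)
  have hR : x + b % n - alpha * x * (b % n) ≡ x + b - alpha * x * b [ZMOD n] :=
    (hmb.add_left x).sub ((hmb.mul_left (alpha * x)))
  have hmid : a + z - alpha * a * z = x + b - alpha * x * b := by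
    rw [ha, hb]; ring
  exact hL.trans (hmid ▸ hR.symm)

theorem has_associative_inverted_multiplication_spec : Claim_equal_has_associative_inverted_multiplication := by
  intro n alpha _
  unfold Spec_has_associative_inverted_multiplication
  unfold has_associative_inverted_multiplication has_associative_inverted_multiplication_alt
  simp only [List.all_eq_true]
  intro x hx y _ z _
  have hn : 0 < n := by
    have := (PySem.List.mem_pyRange_one.mp hx)
    omega
  simp only [beq_iff_eq]
  exact hai_inner n alpha x y z hn
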